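-- pv_equiv track=rewrite | github.com/akhvorov/MultiVariatePointProcess | example/data_prep/process.py | renumerate
-- ===== SOURCE A (Python) =====
-- def renumerate(data, old_to_new_users, old_to_new_projects):
--     new_data = {}
--     for (uid, pid), history in data.items():
--         if uid not in old_to_new_users:
--             old_to_new_users[uid] = len(old_to_new_users) + 1
--         new_uid = old_to_new_users[uid]
--         if pid not in old_to_new_projects:
--             old_to_new_projects[pid] = len(old_to_new_projects) + 1
--         new_pid = old_to_new_projects[pid]
--         new_data[(new_uid, new_pid)] = history
--     return new_data
-- ===== SOURCE B (Python) =====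
-- def renumerate(data, old_to_new_users, old_to_new_projects):
--     # Batch renumbering: collect the not-yet-mapped keys in first-seen order,
--     # assign them consecutive ids by enumeration in one bulk update, then remap.
--     def extend(mapping, keys):
--         seen = set(mapping)
--         fresh = []
--         for k in keys:
--             if k not in seen:
--                 seen = seen | {k}
--                 fresh = fresh + [k]
--         base = len(mapping)
--         mapping.update({k: base + i for i, k in enumerate(fresh, 1)})
--     extend(old_to_new_users, (uid for uid, _ in data))
--     extend(old_to_new_projects, (pid for _, pid in data))
--     return {(old_to_new_users[u], old_to_new_projects[p]): h
--             for (u, p), h in data.items()}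
-- ===== Notes on version B (the rewrite author's own statement) =====
-- stated objective: alternative
-- what changed: Replaces A's per-entry conditional len(dict)+1 insertions with batch index construction: dedupe the unseen user/project keys in first-seen order, assign their ids by enumeration in one bulk dict.update, then remap the data in a separate comprehension using the completed indexes.
import Mathlib
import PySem

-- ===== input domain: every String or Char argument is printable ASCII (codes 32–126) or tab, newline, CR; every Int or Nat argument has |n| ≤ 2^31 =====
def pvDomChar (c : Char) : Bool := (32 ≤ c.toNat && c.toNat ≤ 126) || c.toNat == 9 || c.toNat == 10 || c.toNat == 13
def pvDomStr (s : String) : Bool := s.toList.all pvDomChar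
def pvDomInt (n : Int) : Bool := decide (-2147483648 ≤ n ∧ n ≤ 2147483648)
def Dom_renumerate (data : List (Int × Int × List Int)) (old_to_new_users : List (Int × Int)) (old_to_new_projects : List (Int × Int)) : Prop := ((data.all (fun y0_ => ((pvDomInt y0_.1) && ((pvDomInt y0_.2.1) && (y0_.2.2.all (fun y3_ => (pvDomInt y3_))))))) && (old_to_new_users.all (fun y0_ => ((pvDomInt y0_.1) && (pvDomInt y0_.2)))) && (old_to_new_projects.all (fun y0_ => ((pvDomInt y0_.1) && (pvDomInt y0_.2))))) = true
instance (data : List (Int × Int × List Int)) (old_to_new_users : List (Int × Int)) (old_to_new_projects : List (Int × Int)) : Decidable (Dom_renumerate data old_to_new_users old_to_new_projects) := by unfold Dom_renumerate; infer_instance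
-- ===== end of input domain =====

-- B replaces A's per-entry conditional len(dict)+1 insertions with batch index construction
-- (dedupe the unseen keys in first-seen order, assign ids by enumeration in one bulk update,
-- then remap in a separate pass); equivalence proved about the RETURN value (both Pythons
-- mutate the two map arguments identically in place).

-- ===== PORT A =====
def renumerate (data : List (Int × Int × List Int)) (old_to_new_users : List (Int × Int)) (old_to_new_projects : List (Int × Int)) : List (Int × Int × List Int) :=
  let st := data.foldl
    (fun (st : PySem.Dict Int Int × PySem.Dict Int Int × PySem.Dict (Int × Int) (List Int)) e =>
      let users := if st.1.contains e.1 then st.1 else st.1.insert e.1 ((st.1.size : Int) + 1)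
      let new_uid := users.getD e.1 0
      let projects := if st.2.1.contains e.2.1 then st.2.1 else st.2.1.insert e.2.1 ((st.2.1.size : Int) + 1)
      let new_pid := projects.getD e.2.1 0
      (users, projects, st.2.2.insert (new_uid, new_pid) e.2.2))
    (PySem.Dict.mk old_to_new_users, PySem.Dict.mk old_to_new_projects, PySem.Dict.empty)
  st.2.2.items.map (fun q => (q.1.1, q.1.2, q.2))

-- ===== PORT B =====
-- the inner helper 'extend' of Source B: dedup the unseen keys, then one enumerated bulk update
def pvExtend (mapping : PySem.Dict Int Int) (keys : List Int) : PySem.Dict Int Int :=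
  let fresh := (keys.foldl
      (fun (st : PySem.Set Int × List Int) k =>
        if st.1.contains k then st else (st.1.union {k}, st.2 ++ [k]))
      (PySem.Set.ofList mapping.keys, [])).2
  (PySem.List.enumerate fresh 1).foldl
    (fun m ik => m.insert ik.2 ((mapping.size : Int) + ik.1)) mapping

def renumerate_alt (data : List (Int × Int × List Int)) (old_to_new_users : List (Int × Int)) (old_to_new_projects : List (Int × Int)) : List (Int × Int × List Int) :=
  let u := pvExtend (PySem.Dict.mk old_to_new_users) (data.map (fun e => e.1))
  let p := pvExtend (PySem.Dict.mk old_to_new_projects) (data.map (fun e => e.2.1))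
  let nd := data.foldl
    (fun (nd : PySem.Dict (Int × Int) (List Int)) e =>
      nd.insert (u.getD e.1 0, p.getD e.2.1 0) e.2.2)
    PySem.Dict.empty
  nd.items.map (fun q => (q.1.1, q.1.2, q.2))

-- ===== PRECONDITION & SPEC =====
def Spec_renumerate (data : List (Int × Int × List Int)) (old_to_new_users : List (Int × Int)) (old_to_new_projects : List (Int × Int)) (out : List (Int × Int × List Int)) : Prop := out = renumerate_alt data old_to_new_users old_to_new_projects
instance (data : List (Int × Int × List Int)) (old_to_new_users : List (Int × Int)) (old_to_new_projects : List (Int × Int)) (out : List (Int × Int × List Int)) : Decidable (Spec_renumerate data old_to_new_users old_to_new_projects out) := by unfold Spec_renumerate; infer_instance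

-- ===== CLAIM (what is proved, stated in full; the proofs are below) =====
def Claim_equal_renumerate : Prop := ∀ (data : List (Int × Int × List Int)) (old_to_new_users : List (Int × Int)) (old_to_new_projects : List (Int × Int)), Dom_renumerate data old_to_new_users old_to_new_projects → Spec_renumerate data old_to_new_users old_to_new_projects (renumerate data old_to_new_users old_to_new_projects)

-- ===== LEMMAS AND PROOFS =====

-- A's idiom "if k not in d: d[k] = len(d)+1", for reasoning about port A
def pvEnsure (d : PySem.Dict Int Int) (k : Int) : PySem.Dict Int Int :=
  if d.contains k then d else d.insert k ((d.size : Int) + 1)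

theorem pvEnsure_contains_self (d : PySem.Dict Int Int) (k : Int) :
    (pvEnsure d k).contains k = true := by
  unfold pvEnsure
  split
  · assumption
  · exact PySem.Dict.contains_insert_self _ _ _

theorem pvEnsure_contains_mono (d : PySem.Dict Int Int) (k j : Int)
    (h : d.contains j = true) : (pvEnsure d k).contains j = true := by
  unfold pvEnsure
  split
  · exact h
  · rw [PySem.Dict.contains_insert]; simp [h]

theorem pvEnsure_getD (d : PySem.Dict Int Int) (k j : Int)
    (h : d.contains j = true) : (pvEnsure d k).getD j 0 = d.getD j 0 := by
  unfold pvEnsure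
  split
  · rfl
  · rename_i hk
    have hne : j ≠ k := by rintro rfl; rw [h] at hk; exact hk rfl
    rw [PySem.Dict.getD_insert]
    simp [hne]

-- the index maps A builds along its single loop
def pvMapsFold (data : List (Int × Int × List Int)) (m : PySem.Dict Int Int × PySem.Dict Int Int) :
    PySem.Dict Int Int × PySem.Dict Int Int :=
  data.foldl (fun m e => (pvEnsure m.1 e.1, pvEnsure m.2 e.2.1)) m

theorem pvMapsFold_pres_u (data : List (Int × Int × List Int))
    (m : PySem.Dict Int Int × PySem.Dict Int Int) (j : Int) (h : m.1.contains j = true) :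
    (pvMapsFold data m).1.contains j = true ∧ (pvMapsFold data m).1.getD j 0 = m.1.getD j 0 := by
  induction data generalizing m with
  | nil => exact ⟨h, rfl⟩
  | cons e rest ih =>
    have h' : (pvEnsure m.1 e.1).contains j = true := pvEnsure_contains_mono _ _ _ h
    obtain ⟨hc, hg⟩ := ih (pvEnsure m.1 e.1, pvEnsure m.2 e.2.1) h'
    exact ⟨hc, hg.trans (pvEnsure_getD _ _ _ h)⟩

theorem pvMapsFold_pres_p (data : List (Int × Int × List Int))
    (m : PySem.Dict Int Int × PySem.Dict Int Int) (j : Int) (h : m.2.contains j = true) :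
    (pvMapsFold data m).2.contains j = true ∧ (pvMapsFold data m).2.getD j 0 = m.2.getD j 0 := by
  induction data generalizing m with
  | nil => exact ⟨h, rfl⟩
  | cons e rest ih =>
    have h' : (pvEnsure m.2 e.2.1).contains j = true := pvEnsure_contains_mono _ _ _ h
    obtain ⟨hc, hg⟩ := ih (pvEnsure m.1 e.1, pvEnsure m.2 e.2.1) h'
    exact ⟨hc, hg.trans (pvEnsure_getD _ _ _ h)⟩

-- A's loop, split into the maps fold and the rebuild fold with the FINAL maps
theorem pvMain (data : List (Int × Int × List Int))
    (m : PySem.Dict Int Int × PySem.Dict Int Int) (nd : PySem.Dict (Int × Int) (List Int)) :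
    data.foldl
      (fun (st : PySem.Dict Int Int × PySem.Dict Int Int × PySem.Dict (Int × Int) (List Int)) e =>
        let users := if st.1.contains e.1 then st.1 else st.1.insert e.1 ((st.1.size : Int) + 1)
        let new_uid := users.getD e.1 0
        let projects := if st.2.1.contains e.2.1 then st.2.1 else st.2.1.insert e.2.1 ((st.2.1.size : Int) + 1)
        let new_pid := projects.getD e.2.1 0
        (users, projects, st.2.2.insert (new_uid, new_pid) e.2.2))
      (m.1, m.2, nd)
    = ((pvMapsFold data m).1, (pvMapsFold data m).2,
        data.foldl
          (fun (nd : PySem.Dict (Int × Int) (List Int)) e =>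
            nd.insert ((pvMapsFold data m).1.getD e.1 0, (pvMapsFold data m).2.getD e.2.1 0) e.2.2)
          nd) := by
  induction data generalizing m nd with
  | nil => rfl
  | cons e rest ih =>
    simp only [List.foldl_cons]
    have hm : pvMapsFold (e :: rest) m
        = pvMapsFold rest (pvEnsure m.1 e.1, pvEnsure m.2 e.2.1) := rfl
    show _ = _
    rw [show (if m.1.contains e.1 then m.1 else m.1.insert e.1 ((m.1.size : Int) + 1)) = pvEnsure m.1 e.1 from rfl,
        show (if m.2.contains e.2.1 then m.2 else m.2.insert e.2.1 ((m.2.size : Int) + 1)) = pvEnsure m.2 e.2.1 from rfl]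
    rw [ih (pvEnsure m.1 e.1, pvEnsure m.2 e.2.1), hm]
    have hu := pvMapsFold_pres_u rest (pvEnsure m.1 e.1, pvEnsure m.2 e.2.1) e.1
      (pvEnsure_contains_self m.1 e.1)
    have hp := pvMapsFold_pres_p rest (pvEnsure m.1 e.1, pvEnsure m.2 e.2.1) e.2.1
      (pvEnsure_contains_self m.2 e.2.1)
    rw [hu.2, hp.2]

-- ---- B's pvExtend equals the pvEnsure fold ----

-- one step of Source B's dedup loop
def pvStep (st : PySem.Set Int × List Int) (k : Int) : PySem.Set Int × List Int :=
  if st.1.contains k then st else (st.1.union {k}, st.2 ++ [k])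

theorem pvStep_pos (st : PySem.Set Int × List Int) (k : Int) (h : st.1.contains k = true) :
    pvStep st k = st := by unfold pvStep; rw [if_pos h]

theorem pvStep_neg (st : PySem.Set Int × List Int) (k : Int) (h : st.1.contains k = false) :
    pvStep st k = (st.1.add k, st.2 ++ [k]) := by
  unfold pvStep
  rw [if_neg (by rw [h]; simp)]
  rfl

-- recursive description of Source B's dedup pass
def pvFreshR (s : PySem.Set Int) : List Int → List Int
  | [] => []
  | k :: ks => if s.contains k then pvFreshR s ks else k :: pvFreshR (s.add k) ks

theorem pvFreshFold_acc (keys : List Int) (s : PySem.Set Int) (acc : List Int) :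
    keys.foldl pvStep (s, acc)
    = ((keys.foldl pvStep (s, [])).1, acc ++ (keys.foldl pvStep (s, [])).2) := by
  induction keys generalizing s acc with
  | nil => simp
  | cons k ks ih =>
    simp only [List.foldl_cons]
    cases h : s.contains k with
    | true =>
      rw [pvStep_pos (s, acc) k h, pvStep_pos (s, []) k h]
      exact ih s acc
    | false =>
      rw [pvStep_neg (s, acc) k h, pvStep_neg (s, []) k h]
      rw [ih (s.add k) (acc ++ [k]), ih (s.add k) ([] ++ [k])]
      simp

theorem pvFreshFold_eq (keys : List Int) (s : PySem.Set Int) :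
    (keys.foldl pvStep (s, [])).2 = pvFreshR s keys := by
  induction keys generalizing s with
  | nil => rfl
  | cons k ks ih =>
    simp only [List.foldl_cons, pvFreshR]
    cases h : s.contains k with
    | true =>
      rw [pvStep_pos (s, []) k h]
      exact ih s
    | false =>
      rw [pvStep_neg (s, []) k h, if_neg (by simp)]
      rw [pvFreshFold_acc ks (s.add k) ([] ++ [k])]
      simp [ih (s.add k)]

theorem pvSet_contains_add (s : PySem.Set Int) (k j : Int) :
    (s.add k).contains j = (s.contains j || j == k) := by
  simp only [PySem.Set.contains_eq_listContains]
  unfold PySem.Set.add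
  cases h : s.contains k with
  | true =>
    rw [if_pos rfl]
    by_cases hj : j = k
    · subst hj
      rw [PySem.Set.contains_eq_listContains] at h
      simp at h
      simp [h]
    · simp [hj]
  | false =>
    rw [if_neg (by simp)]
    by_cases hj : j = k
    · subst hj; simp
    · simp [hj]

-- the enumerated bulk-update pass, as a plain recursion with an explicit counter
def pvInsEnum (base : Int) (m : PySem.Dict Int Int) (i : Int) : List Int → PySem.Dict Int Int
  | [] => m
  | k :: ks => pvInsEnum base (m.insert k (base + i)) (i + 1) ks

theorem pvInsEnum_eq_foldl (base : Int) (fresh : List Int) (m : PySem.Dict Int Int) (i : Int) :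
    (PySem.List.enumerate fresh i).foldl (fun m ik => m.insert ik.2 (base + ik.1)) m
    = pvInsEnum base m i fresh := by
  induction fresh generalizing m i with
  | nil => rfl
  | cons k ks ih =>
    rw [PySem.List.enumerate_cons]
    simp only [List.foldl_cons, pvInsEnum]
    exact ih _ _

theorem pvInsEnum_shift (base : Int) (fresh : List Int) (m : PySem.Dict Int Int) (i : Int) :
    pvInsEnum base m (i + 1) fresh = pvInsEnum (base + 1) m i fresh := by
  induction fresh generalizing m i with
  | nil => rfl
  | cons k ks ih =>
    simp only [pvInsEnum]
    rw [show base + (i + 1) = base + 1 + i by ring]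
    exact ih _ _

theorem pvExtend_main (keys : List Int) (M : PySem.Dict Int Int) (s : PySem.Set Int)
    (h : ∀ j, s.contains j = M.contains j) :
    pvInsEnum (M.size : Int) M 1 (pvFreshR s keys) = keys.foldl pvEnsure M := by
  induction keys generalizing M s with
  | nil => rfl
  | cons k ks ih =>
    simp only [pvFreshR, List.foldl_cons, h k]
    cases hk : M.contains k with
    | true =>
      rw [show pvEnsure M k = M by unfold pvEnsure; rw [if_pos hk]]
      exact ih M s h
    | false =>
      simp only [if_neg (by simp : ¬ (false = true))]
      have hE : pvEnsure M k = M.insert k ((M.size : Int) + 1) := by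
        unfold pvEnsure; rw [if_neg (by simp [hk])]
      simp only [pvInsEnum]
      rw [pvInsEnum_shift]
      have hsize : ((M.insert k ((M.size : Int) + 1)).size : Int) = (M.size : Int) + 1 := by
        rw [PySem.Dict.size_insert]
        simp [hk]
      rw [hE]
      have hrec := ih (M.insert k ((M.size : Int) + 1))
        (s.add k)
        (fun j => by
          rw [pvSet_contains_add, h j, PySem.Dict.contains_insert, Bool.or_comm])
      rw [hsize] at hrec
      exact hrec

theorem pvOfList_keys_contains (M : PySem.Dict Int Int) (j : Int) :
    (PySem.Set.ofList M.keys).contains j = M.contains j := by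
  by_cases h : j ∈ M.keys
  · rw [(PySem.Set.contains_iff _ _).2 ((PySem.Set.mem_ofList _ _).2 h),
        ((PySem.Dict.contains_iff_mem_keys _ _).2 h)]
  · have h1 : ¬ (PySem.Set.ofList M.keys).contains j = true :=
      fun hc => h ((PySem.Set.mem_ofList _ _).1 ((PySem.Set.contains_iff _ _).1 hc))
    have h2 : ¬ M.contains j = true :=
      fun hc => h ((PySem.Dict.contains_iff_mem_keys _ _).1 hc)
    simp only [Bool.not_eq_true] at h1 h2
    rw [h1, h2]

theorem pvExtend_eq (M : PySem.Dict Int Int) (keys : List Int) :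
    pvExtend M keys = keys.foldl pvEnsure M := by
  unfold pvExtend
  simp only
  rw [show (fun (st : PySem.Set Int × List Int) k =>
        if st.1.contains k then st else (st.1.union {k}, st.2 ++ [k])) = pvStep from rfl]
  rw [pvFreshFold_eq, pvInsEnum_eq_foldl]
  exact pvExtend_main keys M _ (pvOfList_keys_contains M)

theorem pvMapsFold_split (data : List (Int × Int × List Int))
    (m : PySem.Dict Int Int × PySem.Dict Int Int) :
    pvMapsFold data m
    = ((data.map (fun e => e.1)).foldl pvEnsure m.1,
       (data.map (fun e => e.2.1)).foldl pvEnsure m.2) := by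
  induction data generalizing m with
  | nil => rfl
  | cons e rest ih =>
    simp only [pvMapsFold, List.foldl_cons, List.map_cons]
    exact ih (pvEnsure m.1 e.1, pvEnsure m.2 e.2.1)

-- ===== VERDICT (by name: the statement is the Claim_ definition above) =====
theorem renumerate_spec : Claim_equal_renumerate := by
  intro data u0 p0 _
  unfold Spec_renumerate renumerate renumerate_alt
  rw [pvMain data (PySem.Dict.mk u0, PySem.Dict.mk p0) PySem.Dict.empty]
  simp only
  rw [pvMapsFold_split data (PySem.Dict.mk u0, PySem.Dict.mk p0)]
  rw [pvExtend_eq, pvExtend_eq]
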